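-- pv_equiv track=rewrite | github.com/sinairusinek/Dybbuk | Zylbercweig/zibn-shtern/src/zibn_shtern/triage.py | _collect_p131_ancestors
-- ===== SOURCE A (Python) =====
-- from typing import Any
--
-- def _collect_p131_ancestors(start_qid: str, details: dict[str, dict[str, Any]], max_depth: int = 6) -> set[str]:
--     if not start_qid or max_depth <= 0:
--         return set()
--
--     ancestors: set[str] = set()
--     frontier: set[str] = {start_qid}
--     visited: set[str] = set()
--
--     for _ in range(max_depth):
--         if not frontier:
--             break
--
--         next_frontier: set[str] = set()
--         for qid in frontier:
--             if qid in visited: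
--                 continue
--             visited.add(qid)
--
--             detail = details.get(qid)
--             if not detail:
--                 continue
--
--             for parent in detail.get("p131", []):
--                 if parent not in ancestors:
--                     ancestors.add(parent)
--                 if parent not in visited:
--                     next_frontier.add(parent)
--
--         frontier = next_frontier
--
--     return ancestors
-- ===== SOURCE B (Python) =====
-- def _collect_p131_ancestors(start_qid: str, details: dict, max_depth: int = 6) -> set:
--     # Two-phase: saturate the reachable set (monotone closure, depth-bounded),
--     # then collect all parents of reached nodes in one final pass.
--     if not start_qid or max_depth <= 0:
--         return set()
--
--     def parents(qid):
--         return (details.get(qid) or {}).get("p131", [])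
--
--     reach = {start_qid}
--     for _ in range(max_depth - 1):
--         new = {p for q in reach for p in parents(q) if p not in reach}
--         if not new:
--             break
--         reach |= new
--
--     return {p for q in reach for p in parents(q)}
-- ===== Notes on version B (the rewrite author's own statement) =====
-- stated objective: alternative
-- what changed: replaces the single-pass BFS that threads ancestors/frontier/visited sets through the traversal by a two-phase algorithm: a depth-bounded monotone closure of the reachable set (no visited set, no incremental ancestor bookkeeping) followed by one final comprehension collecting all parents of reached nodes
import Mathlib
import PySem

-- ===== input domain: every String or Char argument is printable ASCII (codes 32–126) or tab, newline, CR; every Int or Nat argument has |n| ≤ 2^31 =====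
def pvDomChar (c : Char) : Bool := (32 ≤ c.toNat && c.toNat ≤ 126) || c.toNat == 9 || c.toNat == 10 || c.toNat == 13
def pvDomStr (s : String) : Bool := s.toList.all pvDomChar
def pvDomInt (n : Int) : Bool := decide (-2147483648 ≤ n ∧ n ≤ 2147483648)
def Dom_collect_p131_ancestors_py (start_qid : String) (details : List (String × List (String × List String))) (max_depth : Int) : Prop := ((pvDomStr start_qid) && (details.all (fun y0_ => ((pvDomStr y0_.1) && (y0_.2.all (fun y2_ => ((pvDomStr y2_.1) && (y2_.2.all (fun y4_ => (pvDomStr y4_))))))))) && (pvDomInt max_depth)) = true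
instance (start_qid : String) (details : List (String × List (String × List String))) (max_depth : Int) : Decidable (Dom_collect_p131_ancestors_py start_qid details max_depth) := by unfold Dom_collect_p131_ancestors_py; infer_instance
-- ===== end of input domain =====

-- B replaces A's single-pass BFS (ancestors/frontier/visited threaded through the traversal) by a
-- depth-bounded monotone closure of the reachable set followed by one final parent-collecting pass;
-- objective: alternative decomposition (not faster).

-- ===== PORT A =====
-- one iteration of A's inner `for qid in frontier` body; state = (ancestors, next_frontier, visited)
def aStep (details : List (String × List (String × List String)))
    (s : List String × List String × List String) (qid : String) :
    List String × List String × List String :=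
  if qid ∈ s.2.2 then s
  else
    let vis := PySem.Set.add s.2.2 qid
    match PySem.Dict.get? (PySem.Dict.mk details) qid with
    | none => (s.1, s.2.1, vis)
    | some detail =>
      if detail = [] then (s.1, s.2.1, vis)
      else
        let t := (PySem.Dict.getD (PySem.Dict.mk detail) "p131" []).foldl
          (fun (t : List String × List String) parent =>
            (if parent ∈ t.1 then t.1 else PySem.Set.add t.1 parent,
             if parent ∈ vis then t.2 else PySem.Set.add t.2 parent)) (s.1, s.2.1)
        (t.1, t.2, vis)

-- A's `for _ in range(max_depth)` with its `break`; state = (ancestors, frontier, visited)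
def aLoop (details : List (String × List (String × List String))) :
    Nat → List String × List String × List String → List String
  | 0, s => s.1
  | n+1, s =>
    if s.2.1 = [] then s.1
    else aLoop details n (s.2.1.foldl (aStep details) (s.1, ([] : List String), s.2.2))

def collect_p131_ancestors_py (start_qid : String) (details : List (String × List (String × List String))) (max_depth : Int) : List String :=
  if start_qid = "" ∨ max_depth ≤ 0 then []
  else aLoop details max_depth.toNat ([], [start_qid], [])

-- ===== PORT B =====
-- (details.get(qid) or {}).get("p131", [])
def bParents (details : List (String × List (String × List String))) (qid : String) : List String :=
  PySem.Dict.getD (PySem.Dict.mk (match PySem.Dict.get? (PySem.Dict.mk details) qid with | none => [] | some d => d)) "p131" []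

-- {p for q in reach for p in parents(q) if p not in reach}
def bNew (details : List (String × List (String × List String))) (reach : List String) : List String :=
  reach.foldl (fun new q =>
    (bParents details q).foldl (fun new p => if p ∉ reach then PySem.Set.add new p else new) new) []

-- `for _ in range(max_depth - 1)` with its `break`; `reach |= new`
def bLoop (details : List (String × List (String × List String))) :
    Nat → List String → List String
  | 0, reach => reach
  | n+1, reach =>
    let nw := bNew details reach
    if nw = [] then reach
    else bLoop details n (PySem.Set.update reach nw)

def collect_p131_ancestors_py_alt (start_qid : String) (details : List (String × List (String × List String))) (max_depth : Int) : List String :=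
  if start_qid = "" ∨ max_depth ≤ 0 then []
  else
    let reach := bLoop details (max_depth - 1).toNat [start_qid]
    reach.foldl (fun anc q => (bParents details q).foldl (fun anc p => PySem.Set.add anc p) anc) []

-- ===== PRECONDITION & SPEC =====
def Spec_collect_p131_ancestors_py (start_qid : String) (details : List (String × List (String × List String))) (max_depth : Int) (out : List String) : Prop := out = collect_p131_ancestors_py_alt start_qid details max_depth
instance (start_qid : String) (details : List (String × List (String × List String))) (max_depth : Int) (out : List String) : Decidable (Spec_collect_p131_ancestors_py start_qid details max_depth out) := by unfold Spec_collect_p131_ancestors_py; infer_instance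

-- ===== CLAIM (what is proved, stated in full; the proofs are below) =====
def Claim_equal_collect_p131_ancestors_py : Prop := ∀ (start_qid : String) (details : List (String × List (String × List String))) (max_depth : Int), Dom_collect_p131_ancestors_py start_qid details max_depth → Spec_collect_p131_ancestors_py start_qid details max_depth (collect_p131_ancestors_py start_qid details max_depth)

-- ===== LEMMAS AND PROOFS =====

-- B's final pass, as a function of the reached list
def ancStep (details : List (String × List (String × List String))) (anc : List String) (q : String) : List String :=
  (bParents details q).foldl (fun anc p => PySem.Set.add anc p) anc

def ancOf (details : List (String × List (String × List String))) (vis : List String) : List String :=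
  vis.foldl (ancStep details) []

-- one node of B's `new` comprehension
def bStep (details : List (String × List (String × List String))) (R : List String) (acc : List String) (q : String) : List String :=
  (bParents details q).foldl (fun acc p => if p ∉ R then PySem.Set.add acc p else acc) acc

theorem bNew_eq_foldl (details : List (String × List (String × List String))) (R : List String) :
    bNew details R = R.foldl (bStep details R) [] := rfl

theorem alt_eq_ancOf (start_qid : String) (details : List (String × List (String × List String))) (max_depth : Int)
    (h : ¬ (start_qid = "" ∨ max_depth ≤ 0)) :
    collect_p131_ancestors_py_alt start_qid details max_depth
      = ancOf details (bLoop details (max_depth - 1).toNat [start_qid]) := by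
  simp only [collect_p131_ancestors_py_alt, if_neg h]
  rfl

-- ---- A's inner parent loop ----

theorem inner_split (vis : List String) :
    ∀ (ps anc nf : List String),
      ps.foldl (fun (t : List String × List String) parent =>
          (if parent ∈ t.1 then t.1 else PySem.Set.add t.1 parent,
           if parent ∈ vis then t.2 else PySem.Set.add t.2 parent)) (anc, nf)
      = (ps.foldl (fun a p => PySem.Set.add a p) anc,
         ps.foldl (fun nf p => if p ∈ vis then nf else PySem.Set.add nf p) nf) := by
  intro ps
  induction ps with
  | nil => intro anc nf; rfl
  | cons p ps ih =>
    intro anc nf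
    simp only [List.foldl_cons, ih]
    congr 1
    by_cases hp : p ∈ anc
    · rw [if_pos hp, PySem.Set.add_of_mem hp]
    · rw [if_neg hp]

theorem add_filter (R nf : List String) (p : String) :
    (PySem.Set.add nf p).filter (fun x => decide (x ∉ R))
      = if p ∈ R then nf.filter (fun x => decide (x ∉ R))
        else PySem.Set.add (nf.filter (fun x => decide (x ∉ R))) p := by
  by_cases hnf : p ∈ nf
  · rw [PySem.Set.add_of_mem hnf]
    by_cases hR : p ∈ R
    · rw [if_pos hR]
    · have hm : p ∈ nf.filter (fun x => decide (x ∉ R)) := by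
        simp [List.mem_filter, hnf, hR]
      rw [if_neg hR, PySem.Set.add_of_mem hm]
  · rw [PySem.Set.add_of_not_mem hnf]
    by_cases hR : p ∈ R
    · rw [if_pos hR, List.filter_append]
      simp [hR]
    · have hnf' : p ∉ nf.filter (fun x => decide (x ∉ R)) := by
        simp [List.mem_filter, hnf]
      rw [if_neg hR, PySem.Set.add_of_not_mem hnf', List.filter_append]
      simp [hR]

theorem nf_filter (R vis : List String) (h : ∀ x ∈ vis, x ∈ R) :
    ∀ (ps nf : List String),
      (ps.foldl (fun nf p => if p ∈ vis then nf else PySem.Set.add nf p) nf).filter (fun x => decide (x ∉ R))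
      = ps.foldl (fun acc p => if p ∉ R then PySem.Set.add acc p else acc) (nf.filter (fun x => decide (x ∉ R))) := by
  intro ps
  induction ps with
  | nil => intro nf; rfl
  | cons p ps ih =>
    intro nf
    simp only [List.foldl_cons]
    by_cases hv : p ∈ vis
    · rw [if_pos hv, ih, if_neg (by simp [h p hv])]
    · rw [if_neg hv, ih, add_filter]
      by_cases hR : p ∈ R
      · simp [hR]
      · simp [hR]

theorem foldNf_mono (vis : List String) :
    ∀ (ps nf : List String) (x : String), x ∈ nf →
      x ∈ ps.foldl (fun nf p => if p ∈ vis then nf else PySem.Set.add nf p) nf := by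
  intro ps
  induction ps with
  | nil => intro nf x hx; exact hx
  | cons p ps ih =>
    intro nf x hx
    simp only [List.foldl_cons]
    by_cases hv : p ∈ vis
    · rw [if_pos hv]; exact ih nf x hx
    · rw [if_neg hv]
      exact ih _ x (by rw [PySem.Set.mem_add]; exact Or.inl hx)

theorem foldNf_nodup (vis : List String) :
    ∀ (ps nf : List String), nf.Nodup →
      (ps.foldl (fun nf p => if p ∈ vis then nf else PySem.Set.add nf p) nf).Nodup := by
  intro ps
  induction ps with
  | nil => intro nf h; exact h
  | cons p ps ih =>
    intro nf h
    simp only [List.foldl_cons]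
    by_cases hv : p ∈ vis
    · rw [if_pos hv]; exact ih nf h
    · rw [if_neg hv]; exact ih _ (PySem.Set.nodup_add _ _ h)

theorem foldNf_mem (vis : List String) :
    ∀ (ps nf : List String) (p : String), p ∈ ps → p ∉ vis →
      p ∈ ps.foldl (fun nf p => if p ∈ vis then nf else PySem.Set.add nf p) nf := by
  intro ps
  induction ps with
  | nil => intro nf p hp; exact absurd hp (List.not_mem_nil)
  | cons q ps ih =>
    intro nf p hp hv
    simp only [List.foldl_cons]
    rcases List.mem_cons.mp hp with rfl | hp'
    · rw [if_neg hv]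
      exact foldNf_mono vis ps _ p (by rw [PySem.Set.mem_add]; exact Or.inr rfl)
    · by_cases hq : q ∈ vis
      · rw [if_pos hq]; exact ih nf p hp' hv
      · rw [if_neg hq]; exact ih _ p hp' hv

-- ---- A's step characterised ----

theorem aStep_stale (details : List (String × List (String × List String)))
    (s : List String × List String × List String) (q : String) (hq : q ∈ s.2.2) :
    aStep details s q = s := by
  simp [aStep, hq]

theorem aStep_fresh (details : List (String × List (String × List String)))
    (anc nf vis : List String) (q : String) (hq : q ∉ vis) :
    aStep details (anc, nf, vis) q =
      ((bParents details q).foldl (fun a p => PySem.Set.add a p) anc,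
       (bParents details q).foldl (fun nf p => if p ∈ vis ++ [q] then nf else PySem.Set.add nf p) nf,
       vis ++ [q]) := by
  show (if q ∈ vis then (anc, nf, vis) else _) = _
  rw [if_neg hq]
  show (let v := PySem.Set.add vis q; _ : _ × _ × _) = _
  rw [show PySem.Set.add vis q = vis ++ [q] from PySem.Set.add_of_not_mem hq]
  cases hd : PySem.Dict.get? (PySem.Dict.mk details) q with
  | none =>
    have hb : bParents details q = [] := by unfold bParents; rw [hd]; rfl
    simp [hb]
  | some d =>
    by_cases hde : d = []
    · subst hde
      have hb : bParents details q = [] := by unfold bParents; rw [hd]; rfl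
      simp [hb]
    · have hb : bParents details q = PySem.Dict.getD (PySem.Dict.mk d) "p131" [] := by
        unfold bParents; rw [hd]
      simp only [hde]
      rw [inner_split, hb]
      simp

-- ---- the round lemma: one frontier pass of A, related to B's data ----

theorem a_round (details : List (String × List (String × List String))) (R : List String) :
    ∀ (fr anc nf vis : List String),
      fr.Nodup → vis.Nodup → nf.Nodup →
      (∀ x ∈ vis, x ∈ R) → (∀ x ∈ fr, x ∈ R) →
      (fr.foldl (aStep details) (anc, nf, vis)).2.2 = vis ++ fr.filter (fun x => decide (x ∉ vis))
      ∧ (fr.foldl (aStep details) (anc, nf, vis)).1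
          = (fr.filter (fun x => decide (x ∉ vis))).foldl (ancStep details) anc
      ∧ (fr.foldl (aStep details) (anc, nf, vis)).2.1.filter (fun x => decide (x ∉ R))
          = (fr.filter (fun x => decide (x ∉ vis))).foldl (bStep details R) (nf.filter (fun x => decide (x ∉ R)))
      ∧ (∀ x ∈ nf, x ∈ (fr.foldl (aStep details) (anc, nf, vis)).2.1)
      ∧ (fr.foldl (aStep details) (anc, nf, vis)).2.1.Nodup
      ∧ (∀ q ∈ fr.filter (fun x => decide (x ∉ vis)), ∀ p ∈ bParents details q,
           p ∈ vis ++ fr.filter (fun x => decide (x ∉ vis)) ∨ p ∈ (fr.foldl (aStep details) (anc, nf, vis)).2.1) := by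
  intro fr
  induction fr with
  | nil =>
    intro anc nf vis _ _ h3 _ _
    exact ⟨by simp, by simp, by simp, fun x hx => hx, h3, by simp⟩
  | cons q fr ih =>
    intro anc nf vis hfrnd hvisnd hnfnd hv hf
    have hqfr : q ∉ fr := (List.nodup_cons.mp hfrnd).1
    have hfrnd' : fr.Nodup := (List.nodup_cons.mp hfrnd).2
    have hf' : ∀ x ∈ fr, x ∈ R := fun x hx => hf x (List.mem_cons_of_mem _ hx)
    by_cases hqv : q ∈ vis
    · have hfil : (q :: fr).filter (fun x => decide (x ∉ vis)) = fr.filter (fun x => decide (x ∉ vis)) := by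
        simp [hqv]
      rw [List.foldl_cons, aStep_stale details (anc, nf, vis) q hqv, hfil]
      exact ih anc nf vis hfrnd' hvisnd hnfnd hv hf'
    · have hqR : q ∈ R := hf q List.mem_cons_self
      have hv' : ∀ x ∈ vis ++ [q], x ∈ R := by
        intro x hx
        rcases List.mem_append.mp hx with h | h
        · exact hv x h
        · rw [List.mem_singleton.mp h]; exact hqR
      have hvisnd' : (vis ++ [q]).Nodup := by
        simp [List.nodup_append, hvisnd]
        exact fun a ha hb => hqv (hb ▸ ha)
      have hN1nd : ((bParents details q).foldl
          (fun nf p => if p ∈ vis ++ [q] then nf else PySem.Set.add nf p) nf).Nodup :=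
        foldNf_nodup (vis ++ [q]) (bParents details q) nf hnfnd
      rw [List.foldl_cons, aStep_fresh details anc nf vis q hqv]
      obtain ⟨c1, c2, c3, c4, c5, c6⟩ := ih _ _ (vis ++ [q]) hfrnd' hvisnd' hN1nd hv' hf'
      have hfil : fr.filter (fun x => decide (x ∉ vis ++ [q])) = fr.filter (fun x => decide (x ∉ vis)) := by
        apply List.filter_congr
        intro x hx
        have hxq : x ≠ q := fun h => hqfr (h ▸ hx)
        simp [List.mem_append, hxq]
      have hfilq : (q :: fr).filter (fun x => decide (x ∉ vis)) = q :: fr.filter (fun x => decide (x ∉ vis)) := by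
        simp [hqv]
      rw [hfilq]
      refine ⟨?_, ?_, ?_, ?_, ?_, ?_⟩
      · rw [c1, hfil]; simp
      · rw [c2, hfil, List.foldl_cons]; rfl
      · rw [c3, hfil, List.foldl_cons,
            nf_filter R (vis ++ [q]) hv' (bParents details q) nf]
        rfl
      · intro x hx
        exact c4 x (foldNf_mono (vis ++ [q]) (bParents details q) nf x hx)
      · exact c5
      · intro q' hq' p hp
        rcases List.mem_cons.mp hq' with rfl | hq''
        · by_cases hpv : p ∈ vis ++ [q']
          · left
            rcases List.mem_append.mp hpv with h | h
            · exact List.mem_append.mpr (Or.inl h)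
            · exact List.mem_append.mpr (Or.inr (List.mem_cons.mpr (Or.inl (List.mem_singleton.mp h))))
          · right
            exact c4 p (foldNf_mem (vis ++ [q']) (bParents details q') nf p hp hpv)
        · have hq3 : q' ∈ fr.filter (fun x => decide (x ∉ vis ++ [q])) := hfil.symm ▸ hq''
          rcases c6 q' hq3 p hp with h | h
          · left
            rw [hfil] at h
            rcases List.mem_append.mp h with h' | h'
            · rcases List.mem_append.mp h' with h2 | h2
              · exact List.mem_append.mpr (Or.inl h2)
              · exact List.mem_append.mpr (Or.inr (List.mem_cons.mpr (Or.inl (List.mem_singleton.mp h2))))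
            · exact List.mem_append.mpr (Or.inr (List.mem_cons.mpr (Or.inr h')))
          · right; exact h

-- ---- B-side invariants ----

theorem bInner_inv (R : List String) :
    ∀ (ps acc : List String), acc.Nodup → (∀ x ∈ acc, x ∉ R) →
      (ps.foldl (fun acc p => if p ∉ R then PySem.Set.add acc p else acc) acc).Nodup
      ∧ (∀ x ∈ ps.foldl (fun acc p => if p ∉ R then PySem.Set.add acc p else acc) acc, x ∉ R) := by
  intro ps
  induction ps with
  | nil => intro acc h1 h2; exact ⟨h1, h2⟩
  | cons p ps ih =>
    intro acc h1 h2
    simp only [List.foldl_cons]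
    by_cases hR : p ∈ R
    · rw [if_neg (by simp [hR])]; exact ih acc h1 h2
    · rw [if_pos hR]
      refine ih _ (PySem.Set.nodup_add _ _ h1) ?_
      intro x hx
      rcases (PySem.Set.mem_add _ _ _).mp hx with h | rfl
      · exact h2 x h
      · exact hR

theorem foldl_bStep_inv (details : List (String × List (String × List String))) (R : List String) :
    ∀ (l acc : List String), acc.Nodup → (∀ x ∈ acc, x ∉ R) →
      (l.foldl (bStep details R) acc).Nodup ∧ (∀ x ∈ l.foldl (bStep details R) acc, x ∉ R) := by
  intro l
  induction l with
  | nil => intro acc h1 h2; exact ⟨h1, h2⟩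
  | cons q l ih =>
    intro acc h1 h2
    simp only [List.foldl_cons]
    have h := bInner_inv R (bParents details q) acc h1 h2
    exact ih _ h.1 h.2

theorem foldl_if_mem_id (R : List String) :
    ∀ (ps acc : List String), (∀ p ∈ ps, p ∈ R) →
      ps.foldl (fun acc p => if p ∉ R then PySem.Set.add acc p else acc) acc = acc := by
  intro ps
  induction ps with
  | nil => intro acc _; rfl
  | cons p ps ih =>
    intro acc h
    simp only [List.foldl_cons]
    rw [if_neg (by simp [h p List.mem_cons_self])]
    exact ih acc (fun p' hp' => h p' (List.mem_cons_of_mem _ hp'))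

theorem bStep_id (details : List (String × List (String × List String))) (R : List String)
    (q : String) (h : ∀ p ∈ bParents details q, p ∈ R) (acc : List String) :
    bStep details R acc q = acc :=
  foldl_if_mem_id R (bParents details q) acc h

theorem foldl_bStep_id (details : List (String × List (String × List String))) (R : List String) :
    ∀ (l acc : List String), (∀ q ∈ l, ∀ p ∈ bParents details q, p ∈ R) →
      l.foldl (bStep details R) acc = acc := by
  intro l
  induction l with
  | nil => intro acc _; rfl
  | cons q l ih =>
    intro acc h
    simp only [List.foldl_cons]
    rw [bStep_id details R q (h q (List.mem_cons_self)) acc]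
    exact ih acc (fun q' hq' => h q' (List.mem_cons_of_mem _ hq'))

theorem bLoop_fix (details : List (String × List (String × List String))) (R : List String)
    (h : bNew details R = []) : ∀ n, bLoop details n R = R := by
  intro n
  cases n with
  | zero => rfl
  | succ n => simp [bLoop, h]

theorem foldl_add_append :
    ∀ (xs s : List String), xs.Nodup → (∀ x ∈ xs, x ∉ s) →
      xs.foldl (fun s x => PySem.Set.add s x) s = s ++ xs := by
  intro xs
  induction xs with
  | nil => intro s _ _; simp
  | cons x xs ih =>
    intro s hnd hdisj
    simp only [List.foldl_cons]
    rw [PySem.Set.add_of_not_mem (hdisj x List.mem_cons_self)]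
    rw [ih (s ++ [x]) hnd.of_cons]
    · simp
    · intro y hy
      simp only [List.mem_append, List.mem_singleton]
      rintro (h | rfl)
      · exact hdisj y (List.mem_cons_of_mem _ hy) h
      · exact (List.nodup_cons.mp hnd).1 hy

theorem aLoop_succ (details : List (String × List (String × List String)))
    (n : Nat) (anc fr vis : List String) :
    aLoop details (n+1) (anc, fr, vis)
      = if fr = [] then anc
        else aLoop details n (fr.foldl (aStep details) (anc, ([] : List String), vis)) := rfl

theorem bLoop_succ (details : List (String × List (String × List String))) (n : Nat) (reach : List String) :
    bLoop details (n+1) reach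
      = if bNew details reach = [] then reach
        else bLoop details n (PySem.Set.update reach (bNew details reach)) := rfl

-- ---- the main simultaneous induction ----

theorem loop_eq (details : List (String × List (String × List String))) :
    ∀ (n : Nat) (anc fr vis : List String),
      fr.Nodup → vis.Nodup → anc = ancOf details vis →
      (∀ q ∈ vis, ∀ p ∈ bParents details q, p ∈ vis ∨ p ∈ fr) →
      aLoop details (n+1) (anc, fr, vis)
        = ancOf details (bLoop details n (vis ++ fr.filter (fun x => decide (x ∉ vis)))) := by
  intro n
  induction n with
  | zero =>
    intro anc fr vis hfr hvis hanc hC3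
    by_cases hfre : fr = []
    · subst hfre
      rw [aLoop_succ, if_pos rfl]
      simp only [bLoop, List.filter_nil, List.append_nil]
      exact hanc
    · have hvR : ∀ x ∈ vis, x ∈ vis ++ fr.filter (fun x => decide (x ∉ vis)) :=
        fun x hx => List.mem_append.mpr (Or.inl hx)
      have hfR : ∀ x ∈ fr, x ∈ vis ++ fr.filter (fun x => decide (x ∉ vis)) := by
        intro x hx
        by_cases hxv : x ∈ vis
        · exact List.mem_append.mpr (Or.inl hxv)
        · exact List.mem_append.mpr (Or.inr (List.mem_filter.mpr ⟨hx, by simp [hxv]⟩))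
      obtain ⟨c1, c2, c3, c4, c5, c6⟩ :=
        a_round details (vis ++ fr.filter (fun x => decide (x ∉ vis))) fr anc [] vis
          hfr hvis List.nodup_nil hvR hfR
      rw [aLoop_succ, if_neg hfre]
      simp only [aLoop, bLoop]
      rw [c2, hanc]
      simp only [ancOf, List.foldl_append]
  | succ n ihn =>
    intro anc fr vis hfr hvis hanc hC3
    by_cases hfre : fr = []
    · subst hfre
      have hnew : bNew details vis = [] := by
        rw [bNew_eq_foldl]
        exact foldl_bStep_id details vis vis []
          (fun q hq p hp => (hC3 q hq p hp).resolve_right (by simp))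
      rw [aLoop_succ, if_pos rfl]
      simp only [List.filter_nil, List.append_nil]
      rw [bLoop_fix details vis hnew (n+1)]
      exact hanc
    · have hvR : ∀ x ∈ vis, x ∈ vis ++ fr.filter (fun x => decide (x ∉ vis)) :=
        fun x hx => List.mem_append.mpr (Or.inl hx)
      have hfR : ∀ x ∈ fr, x ∈ vis ++ fr.filter (fun x => decide (x ∉ vis)) := by
        intro x hx
        by_cases hxv : x ∈ vis
        · exact List.mem_append.mpr (Or.inl hxv)
        · exact List.mem_append.mpr (Or.inr (List.mem_filter.mpr ⟨hx, by simp [hxv]⟩))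
      obtain ⟨c1, c2, c3, c4, c5, c6⟩ :=
        a_round details (vis ++ fr.filter (fun x => decide (x ∉ vis))) fr anc [] vis
          hfr hvis List.nodup_nil hvR hfR
      have hRnd : (vis ++ fr.filter (fun x => decide (x ∉ vis))).Nodup :=
        hvis.append (hfr.filter _) (fun a ha hb => by
          have h2 := (List.mem_filter.mp hb).2
          simp at h2
          exact h2 ha)
      have hresanc : (fr.foldl (aStep details) (anc, [], vis)).1
          = ancOf details (fr.foldl (aStep details) (anc, [], vis)).2.2 := by
        rw [c2, c1, hanc]
        simp only [ancOf, List.foldl_append]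
      have hC3' : ∀ q ∈ (fr.foldl (aStep details) (anc, [], vis)).2.2,
          ∀ p ∈ bParents details q, p ∈ (fr.foldl (aStep details) (anc, [], vis)).2.2
            ∨ p ∈ (fr.foldl (aStep details) (anc, [], vis)).2.1 := by
        rw [c1]
        intro q hq p hp
        rcases List.mem_append.mp hq with hqv | hqf
        · rcases hC3 q hqv p hp with h | h
          · exact Or.inl (List.mem_append.mpr (Or.inl h))
          · exact Or.inl (hfR p h)
        · exact c6 q hqf p hp
      have hvisfold : (vis.foldl (bStep details (vis ++ fr.filter (fun x => decide (x ∉ vis))))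
          ([] : List String)) = [] :=
        foldl_bStep_id details _ vis []
          (fun q hq p hp => (hC3 q hq p hp).elim (fun h => hvR p h) (fun h => hfR p h))
      have hvnew : (fr.foldl (aStep details) (anc, [], vis)).2.1.filter
            (fun x => decide (x ∉ vis ++ fr.filter (fun x => decide (x ∉ vis))))
          = bNew details (vis ++ fr.filter (fun x => decide (x ∉ vis))) := by
        rw [c3, bNew_eq_foldl, List.foldl_append, hvisfold]
        rfl
      have hih := ihn (fr.foldl (aStep details) (anc, [], vis)).1
        (fr.foldl (aStep details) (anc, [], vis)).2.1
        (fr.foldl (aStep details) (anc, [], vis)).2.2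
        c5 (c1 ▸ hRnd) hresanc hC3'
      rw [c1, hvnew] at hih
      have htup : fr.foldl (aStep details) (anc, [], vis)
          = ((fr.foldl (aStep details) (anc, [], vis)).1,
             (fr.foldl (aStep details) (anc, [], vis)).2.1,
             vis ++ fr.filter (fun x => decide (x ∉ vis))) := by
        rw [← c1]
      rw [aLoop_succ, if_neg hfre, htup, hih]
      by_cases hnw : bNew details (vis ++ fr.filter (fun x => decide (x ∉ vis))) = []
      · rw [hnw, List.append_nil, bLoop_fix details _ hnw n, bLoop_fix details _ hnw (n+1)]
      · have h1 := foldl_bStep_inv details (vis ++ fr.filter (fun x => decide (x ∉ vis)))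
          (vis ++ fr.filter (fun x => decide (x ∉ vis))) [] List.nodup_nil (by simp)
        rw [← bNew_eq_foldl] at h1
        have hupd : PySem.Set.update (vis ++ fr.filter (fun x => decide (x ∉ vis)))
            (bNew details (vis ++ fr.filter (fun x => decide (x ∉ vis))))
            = (vis ++ fr.filter (fun x => decide (x ∉ vis)))
              ++ bNew details (vis ++ fr.filter (fun x => decide (x ∉ vis))) := by
          show (bNew details (vis ++ fr.filter (fun x => decide (x ∉ vis)))).foldl
              (fun s x => PySem.Set.add s x) (vis ++ fr.filter (fun x => decide (x ∉ vis))) = _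
          exact foldl_add_append _ _ h1.1 h1.2
        rw [bLoop_succ, if_neg hnw, hupd]

theorem collect_p131_ancestors_py_spec : Claim_equal_collect_p131_ancestors_py := by
  intro start_qid details max_depth _
  unfold Spec_collect_p131_ancestors_py
  by_cases h : start_qid = "" ∨ max_depth ≤ 0
  · simp [collect_p131_ancestors_py, collect_p131_ancestors_py_alt, h]
  · rw [alt_eq_ancOf start_qid details max_depth h]
    rw [collect_p131_ancestors_py, if_neg h]
    have hpos : 1 ≤ max_depth := by omega
    obtain ⟨n, hn⟩ : ∃ n, max_depth.toNat = n + 1 :=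
      ⟨max_depth.toNat - 1, by omega⟩
    have hn' : (max_depth - 1).toNat = n := by omega
    rw [hn, hn']
    rw [loop_eq details n [] [start_qid] [] (by simp) (by simp) rfl (by simp)]
    simp
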